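-- pv_equiv track=rewrite | github.com/Cryptonite-MIT/niteCTF-2025 | ai/antakshari/solution/solve.py | get_original_indices
-- ===== SOURCE A (Python) =====
-- def get_original_indices(cluster_index, Z, N):
--     members = []
--     stack = [cluster_index]
--     while stack:
--         idx = stack.pop()
--         if idx < N:
--             members.append(idx)
--         else:
--             row = Z[int(idx) - N]
--             stack.append(row[0])
--             stack.append(row[1])
--     return members
-- ===== SOURCE B (Python) =====
-- def get_original_indices(cluster_index, Z, N):
--     cur = [cluster_index]
--     while any(idx >= N for idx in cur):
--         nxt = []
--         for idx in cur:
--             if idx < N: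
--                 nxt.append(idx)
--             else:
--                 row = Z[int(idx) - N]
--                 nxt.append(row[1])
--                 nxt.append(row[0])
--         cur = nxt
--     return cur
-- ===== Notes on version B (the rewrite author's own statement) =====
-- stated objective: alternative
-- what changed: Replaces A's explicit LIFO stack loop by iterated whole-sequence expansion passes: starting from [cluster_index], each pass substitutes every internal node in place by [row[1], row[0]] until only leaves remain; in-place substitution preserves order, so the fixed point equals A's DFS leaf order.
import Mathlib
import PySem

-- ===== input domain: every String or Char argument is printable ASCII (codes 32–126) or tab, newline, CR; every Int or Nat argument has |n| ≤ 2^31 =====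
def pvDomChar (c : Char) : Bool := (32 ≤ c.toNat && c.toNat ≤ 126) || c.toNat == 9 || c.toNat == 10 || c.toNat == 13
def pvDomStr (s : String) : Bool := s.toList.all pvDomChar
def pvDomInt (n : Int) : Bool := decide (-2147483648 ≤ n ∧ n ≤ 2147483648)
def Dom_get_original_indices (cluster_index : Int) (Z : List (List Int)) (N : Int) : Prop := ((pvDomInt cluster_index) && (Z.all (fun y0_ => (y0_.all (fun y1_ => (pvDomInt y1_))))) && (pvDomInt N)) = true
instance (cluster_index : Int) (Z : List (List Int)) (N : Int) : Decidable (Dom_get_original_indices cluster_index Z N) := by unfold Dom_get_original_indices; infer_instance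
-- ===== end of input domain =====

-- B replaces A's explicit LIFO stack loop by iterated whole-sequence expansion passes
-- (each pass substitutes every internal node in place by [row[1], row[0]]); same result, no speed claim.

-- ===== PORT A =====
-- A's while-loop over the explicit stack; fuel only guards totality (Pre_ guarantees it
-- is never exhausted); Z/row lookups are in range under Pre_, so getD defaults never fire.
-- members.append is ported as cons onto the reversed accumulator, reversed once at the end
def loopA (Z : List (List Int)) (N : Int) : Nat → List Int → List Int → List Int
  | 0, _, acc => acc
  | _ + 1, [], acc => acc
  | f + 1, idx :: rest, acc =>
    if idx < N then loopA Z N f rest (idx :: acc)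
    else
      let row := Z.getD (idx - N).toNat []
      loopA Z N f (row.getD 1 0 :: row.getD 0 0 :: rest) acc

def get_original_indices (cluster_index : Int) (Z : List (List Int)) (N : Int) : List Int :=
  (loopA Z N (2 ^ ((cluster_index - N).toNat + 3)) [cluster_index] []).reverse

-- ===== PORT B =====
-- one expansion pass of Source B's inner for-loop; nxt.append is ported as cons onto the
-- reversed accumulator (row[1] pushed first, then row[0]), reversed once at the pass end
def expandB (Z : List (List Int)) (N : Int) (cur : List Int) : List Int :=
  (cur.foldl (fun nxt idx =>
    if idx < N then idx :: nxt
    else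
      let row := Z.getD (idx - N).toNat []
      row.getD 0 0 :: row.getD 1 0 :: nxt) []).reverse

-- Source B's outer while-loop: repeat passes until no element is ≥ N; fuel guards totality only
def runB (Z : List (List Int)) (N : Int) : Nat → List Int → List Int
  | 0, cur => cur
  | f + 1, cur =>
    if cur.any (fun idx => N ≤ idx) then runB Z N f (expandB Z N cur) else cur

def get_original_indices_alt (cluster_index : Int) (Z : List (List Int)) (N : Int) : List Int :=
  runB Z N ((cluster_index - N).toNat + 2) [cluster_index]

-- ===== PRECONDITION & SPEC =====
-- Pre_: either cluster_index is a leaf (< N, Z never read), or Z is a proper linkage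
-- matrix (every row has ≥ 2 entries whose cluster ids point strictly below that row)
-- and cluster_index names an existing cluster. Outside this A raises IndexError or
-- loops forever, so no return value exists to match.
def Pre_get_original_indices (cluster_index : Int) (Z : List (List Int)) (N : Int) : Prop :=
  cluster_index < N ∨
  cluster_index < N + Z.length ∧
  ∀ i < Z.length, 2 ≤ (Z.getD i []).length ∧
    (Z.getD i []).getD 0 0 < N + (i : Int) ∧ (Z.getD i []).getD 1 0 < N + (i : Int)
instance (cluster_index : Int) (Z : List (List Int)) (N : Int) : Decidable (Pre_get_original_indices cluster_index Z N) := by unfold Pre_get_original_indices; infer_instance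
def pvWitness_get_original_indices : Int × List (List Int) × Int := (2, ([[0, 1]], 2))

def Spec_get_original_indices (cluster_index : Int) (Z : List (List Int)) (N : Int) (out : List Int) : Prop := out = get_original_indices_alt cluster_index Z N
instance (cluster_index : Int) (Z : List (List Int)) (N : Int) (out : List Int) : Decidable (Spec_get_original_indices cluster_index Z N out) := by unfold Spec_get_original_indices; infer_instance

-- ===== CLAIM (what is proved, stated in full; the proofs are below) =====
def Claim_equal_get_original_indices : Prop := ∀ (cluster_index : Int) (Z : List (List Int)) (N : Int), Dom_get_original_indices cluster_index Z N → Pre_get_original_indices cluster_index Z N → Spec_get_original_indices cluster_index Z N (get_original_indices cluster_index Z N)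

-- ===== LEMMAS AND PROOFS =====

-- abbreviation for the validity hypothesis on Z
def ZValid (Z : List (List Int)) (N : Int) : Prop :=
  ∀ i < Z.length, 2 ≤ (Z.getD i []).length ∧
    (Z.getD i []).getD 0 0 < N + (i : Int) ∧ (Z.getD i []).getD 1 0 < N + (i : Int)

-- reference semantics: the leaf sequence of the subtree at idx, by fueled recursion
def leavesAux (Z : List (List Int)) (N : Int) : Nat → Int → List Int
  | 0, _ => []
  | f + 1, idx =>
    if idx < N then [idx]
    else
      let row := Z.getD (idx - N).toNat []
      leavesAux Z N f (row.getD 1 0) ++ leavesAux Z N f (row.getD 0 0)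

def neededFuel (N idx : Int) : Nat := if idx < N then 1 else (idx - N).toNat + 2

def iterBound (N idx : Int) : Nat := 2 ^ (neededFuel N idx + 1) - 1

theorem neededFuel_pos (N idx : Int) : 1 ≤ neededFuel N idx := by
  unfold neededFuel; split <;> omega

theorem iterBound_pos (N idx : Int) : 1 ≤ iterBound N idx := by
  unfold iterBound
  have := Nat.one_lt_two_pow_iff (n := neededFuel N idx + 1)
  omega

theorem child_needed {N idx c : Int} (hge : ¬ idx < N) (hc : c < idx) :
    neededFuel N c + 1 ≤ neededFuel N idx := by
  unfold neededFuel
  rw [if_neg hge]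
  split <;> omega

theorem leavesAux_fuel (Z : List (List Int)) (N : Int) (hV : ZValid Z N) :
    ∀ f g idx, idx < N + Z.length → neededFuel N idx ≤ f → neededFuel N idx ≤ g →
      leavesAux Z N f idx = leavesAux Z N g idx := by
  intro f
  induction f with
  | zero => intro g idx _ hf _; have := neededFuel_pos N idx; omega
  | succ f ih =>
    intro g idx hok hf hg
    have hpos := neededFuel_pos N idx
    obtain ⟨g', rfl⟩ : ∃ g', g = g' + 1 := ⟨g - 1, by omega⟩
    by_cases hlt : idx < N
    · simp [leavesAux, hlt]
    · have hi : (idx - N).toNat < Z.length := by omega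
      obtain ⟨_, h0, h1⟩ := hV _ hi
      have hNidx : N + ((idx - N).toNat : Int) = idx := by omega
      rw [hNidx] at h0 h1
      have rec0 : ∀ c : Int, c < idx → leavesAux Z N f c = leavesAux Z N g' c := by
        intro c hc
        have hcn := child_needed hlt hc
        exact ih g' c (by omega) (by omega) (by omega)
      simp only [leavesAux, if_neg hlt]
      rw [rec0 _ h1, rec0 _ h0]

def goFix (Z : List (List Int)) (N idx : Int) : List Int := leavesAux Z N (neededFuel N idx) idx

theorem goFix_leaf {Z : List (List Int)} {N idx : Int} (h : idx < N) :
    goFix Z N idx = [idx] := by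
  unfold goFix neededFuel; simp [h, leavesAux]

theorem leavesAux_succ (Z : List (List Int)) (N : Int) (f : Nat) (idx : Int) :
    leavesAux Z N (f + 1) idx =
      if idx < N then [idx]
      else leavesAux Z N f ((Z.getD (idx - N).toNat []).getD 1 0) ++
           leavesAux Z N f ((Z.getD (idx - N).toNat []).getD 0 0) := rfl

theorem goFix_split (Z : List (List Int)) (N : Int) (hV : ZValid Z N) (idx : Int)
    (hge : ¬ idx < N) (hok : idx < N + Z.length) :
    goFix Z N idx = goFix Z N ((Z.getD (idx - N).toNat []).getD 1 0) ++
                    goFix Z N ((Z.getD (idx - N).toNat []).getD 0 0) := by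
  have hi : (idx - N).toNat < Z.length := by omega
  obtain ⟨_, h0, h1⟩ := hV _ hi
  have hNidx : N + ((idx - N).toNat : Int) = idx := by omega
  rw [hNidx] at h0 h1
  have hn : neededFuel N idx = (idx - N).toNat + 1 + 1 := by
    unfold neededFuel; rw [if_neg hge]
  unfold goFix
  rw [hn, leavesAux_succ, if_neg hge]
  rw [leavesAux_fuel Z N hV ((idx - N).toNat + 1) (neededFuel N ((Z.getD (idx - N).toNat []).getD 1 0)) _
        (by omega) (by have := child_needed hge h1; omega) (le_refl _),
      leavesAux_fuel Z N hV ((idx - N).toNat + 1) (neededFuel N ((Z.getD (idx - N).toNat []).getD 0 0)) _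
        (by omega) (by have := child_needed hge h0; omega) (le_refl _)]

-- the per-element substitution of one expansion pass
def stepB (Z : List (List Int)) (N idx : Int) : List Int :=
  if idx < N then [idx]
  else [(Z.getD (idx - N).toNat []).getD 1 0, (Z.getD (idx - N).toNat []).getD 0 0]

theorem expandB_flatMap (Z : List (List Int)) (N : Int) (cur : List Int) :
    expandB Z N cur = cur.flatMap (stepB Z N) := by
  unfold expandB
  have h : ∀ (l : List Int) (init : List Int),
      l.foldl (fun nxt idx =>
        if idx < N then idx :: nxt
        else
          let row := Z.getD (idx - N).toNat []
          row.getD 0 0 :: row.getD 1 0 :: nxt) init = (l.flatMap (stepB Z N)).reverse ++ init := by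
    intro l
    induction l with
    | nil => simp
    | cons x xs ih =>
      intro init
      simp only [List.foldl_cons, List.flatMap_cons, List.reverse_append, List.append_assoc]
      rw [ih]
      unfold stepB
      split <;> simp
  rw [h]
  simp

-- any element of the substitution of x is in range, and its fuel need drops for internal x
theorem stepB_child (Z : List (List Int)) (N : Int) (hV : ZValid Z N) (x : Int)
    (hxok : x < N + Z.length) :
    ∀ e ∈ stepB Z N x, e < N + Z.length ∧ (x < N → e = x) ∧
      (¬ x < N → neededFuel N e + 1 ≤ neededFuel N x) := by
  intro e hex
  unfold stepB at hex
  by_cases hlt : x < N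
  · rw [if_pos hlt, List.mem_singleton] at hex
    subst hex
    exact ⟨hxok, fun _ => rfl, fun h => absurd hlt h⟩
  · rw [if_neg hlt] at hex
    have hi : (x - N).toNat < Z.length := by omega
    obtain ⟨_, h0, h1⟩ := hV _ hi
    have hNx : N + ((x - N).toNat : Int) = x := by omega
    rw [hNx] at h0 h1
    rcases List.mem_pair.mp hex with rfl | rfl
    · exact ⟨by omega, fun h => absurd h hlt, fun _ => child_needed hlt h1⟩
    · exact ⟨by omega, fun h => absurd h hlt, fun _ => child_needed hlt h0⟩

-- one pass preserves the flattened leaf sequence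
theorem expand_flatten (Z : List (List Int)) (N : Int) (hV : ZValid Z N) (cur : List Int)
    (hok : ∀ e ∈ cur, e < N + Z.length) :
    ((expandB Z N cur).map (goFix Z N)).flatten = (cur.map (goFix Z N)).flatten := by
  rw [expandB_flatMap]
  induction cur with
  | nil => simp
  | cons x xs ih =>
    have hx := hok x (by simp)
    have hxs := ih (fun e he => hok e (by simp [he]))
    simp only [List.flatMap_cons, List.map_append, List.flatten_append, List.map_cons,
      List.flatten_cons, hxs]
    congr 1
    unfold stepB
    by_cases hlt : x < N
    · simp [hlt, goFix_leaf hlt]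
    · simp only [if_neg hlt, List.map_cons, List.map_nil, List.flatten_cons, List.flatten_nil,
        List.append_nil]
      exact (goFix_split Z N hV x hlt hx).symm

-- a sequence of leaves is its own flattened leaf sequence
theorem flatten_leaves (Z : List (List Int)) (N : Int) (cur : List Int)
    (hall : ∀ e ∈ cur, e < N) : (cur.map (goFix Z N)).flatten = cur := by
  induction cur with
  | nil => simp
  | cons x xs ih =>
    have hx := hall x (by simp)
    simp [goFix_leaf hx, ih (fun e he => hall e (by simp [he]))]

theorem runB_eq (Z : List (List Int)) (N : Int) (hV : ZValid Z N) :
    ∀ f cur, (∀ e ∈ cur, e < N + Z.length) → (∀ e ∈ cur, neededFuel N e ≤ f) →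
      runB Z N f cur = (cur.map (goFix Z N)).flatten := by
  intro f
  induction f with
  | zero =>
    intro cur hok hf
    cases cur with
    | nil => simp [runB]
    | cons e l => have := neededFuel_pos N e; have := hf e (by simp); omega
  | succ f ih =>
    intro cur hok hf
    by_cases hany : cur.any (fun idx => N ≤ idx)
    · -- some internal node: one more pass
      simp only [runB, if_pos hany]
      obtain ⟨w, hw, hwN⟩ := List.any_eq_true.mp hany
      have hwN' : ¬ w < N := by simpa using hwN
      have hf1 : 1 ≤ f := by
        have hfw := hf w hw
        have : neededFuel N w = (w - N).toNat + 2 := by unfold neededFuel; rw [if_neg hwN']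
        omega
      have hok' : ∀ e ∈ expandB Z N cur, e < N + Z.length := by
        rw [expandB_flatMap]
        intro e he
        obtain ⟨x, hx, hex⟩ := List.mem_flatMap.mp he
        exact (stepB_child Z N hV x (hok x hx) e hex).1
      have hf' : ∀ e ∈ expandB Z N cur, neededFuel N e ≤ f := by
        rw [expandB_flatMap]
        intro e he
        obtain ⟨x, hx, hex⟩ := List.mem_flatMap.mp he
        obtain ⟨-, hleafc, hintc⟩ := stepB_child Z N hV x (hok x hx) e hex
        have hxf := hf x hx
        by_cases hlt : x < N
        · have he1 : neededFuel N e = 1 := by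
            rw [hleafc hlt]; unfold neededFuel; rw [if_pos hlt]
          omega
        · have := hintc hlt
          omega
      rw [ih (expandB Z N cur) hok' hf']
      exact expand_flatten Z N hV cur hok
    · -- all leaves: fixed point reached
      simp only [runB, if_neg hany]
      have hall : ∀ e ∈ cur, e < N := by
        intro e he
        by_contra h
        exact hany (List.any_eq_true.mpr ⟨e, he, by simpa using h⟩)
      exact (flatten_leaves Z N cur hall).symm

theorem loopA_eq (Z : List (List Int)) (N : Int) (hV : ZValid Z N) :
    ∀ f st acc, (∀ e ∈ st, e < N + Z.length) → (st.map (iterBound N)).sum ≤ f →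
      loopA Z N f st acc = (st.map (goFix Z N)).flatten.reverse ++ acc := by
  intro f
  induction f with
  | zero =>
    intro st acc hok hf
    cases st with
    | nil => simp [loopA]
    | cons e st => have := iterBound_pos N e; simp at hf; omega
  | succ f ih =>
    intro st acc hok hf
    cases st with
    | nil => simp [loopA]
    | cons idx rest =>
      have hokidx := hok idx (by simp)
      have hokrest : ∀ e ∈ rest, e < N + Z.length := fun e he => hok e (by simp [he])
      simp only [List.map_cons, List.sum_cons] at hf
      by_cases hlt : idx < N
      · simp only [loopA, if_pos hlt]
        rw [ih rest (idx :: acc) hokrest (by have := iterBound_pos N idx; omega)]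
        simp [goFix_leaf hlt]
      · have hi : (idx - N).toNat < Z.length := by omega
        obtain ⟨_, h0, h1⟩ := hV _ hi
        have hNidx : N + ((idx - N).toNat : Int) = idx := by omega
        rw [hNidx] at h0 h1
        set c0 := (Z.getD (idx - N).toNat []).getD 0 0 with hc0
        set c1 := (Z.getD (idx - N).toNat []).getD 1 0 with hc1
        have hsplit : goFix Z N idx = goFix Z N c1 ++ goFix Z N c0 :=
          goFix_split Z N hV idx hlt hokidx
        have hib : iterBound N c1 + iterBound N c0 + 1 ≤ iterBound N idx := by
          unfold iterBound
          have b1 : neededFuel N c1 + 1 ≤ neededFuel N idx := child_needed hlt h1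
          have b0 : neededFuel N c0 + 1 ≤ neededFuel N idx := child_needed hlt h0
          have p1 : 2 ^ (neededFuel N c1 + 1) ≤ 2 ^ neededFuel N idx :=
            Nat.pow_le_pow_right (by norm_num) b1
          have p0 : 2 ^ (neededFuel N c0 + 1) ≤ 2 ^ neededFuel N idx :=
            Nat.pow_le_pow_right (by norm_num) b0
          have hq : 2 ^ (neededFuel N idx + 1) = 2 * 2 ^ neededFuel N idx := by ring
          have hp1 : 1 ≤ 2 ^ (neededFuel N c1 + 1) := Nat.one_le_two_pow
          have hp0 : 1 ≤ 2 ^ (neededFuel N c0 + 1) := Nat.one_le_two_pow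
          omega
        simp only [loopA, if_neg hlt]
        rw [ih (c1 :: c0 :: rest) acc
          (by intro e he; simp at he
              rcases he with rfl | rfl | he
              · omega
              · omega
              · exact hokrest e he)
          (by simp; omega)]
        simp [hsplit]

-- ===== VERDICT (by name: the statement is the Claim_ definition above) =====
theorem get_original_indices_spec : Claim_equal_get_original_indices := by
  intro cluster_index Z N _ hPre
  unfold Spec_get_original_indices get_original_indices get_original_indices_alt
  rcases hPre with hleaf | ⟨hok, hV⟩
  · -- leaf: both programs emit cluster_index immediately, Z is never read
    obtain ⟨f, hf⟩ : ∃ f, 2 ^ ((cluster_index - N).toNat + 3) = f + 1 :=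
      ⟨2 ^ ((cluster_index - N).toNat + 3) - 1, by have := Nat.one_le_two_pow (n := (cluster_index - N).toNat + 3); omega⟩
    rw [hf]
    simp only [loopA, if_pos hleaf]
    have hany : ¬ ([cluster_index].any (fun idx => N ≤ idx)) = true := by simp; omega
    cases f <;> simp [loopA, runB, hany]
  have hneed : neededFuel N cluster_index ≤ (cluster_index - N).toNat + 2 := by
    unfold neededFuel; split <;> omega
  have hfuel : iterBound N cluster_index ≤ 2 ^ ((cluster_index - N).toNat + 3) := by
    unfold iterBound
    exact le_trans (Nat.sub_le _ _)
      (Nat.pow_le_pow_right (by norm_num) (by omega))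
  rw [loopA_eq Z N hV _ [cluster_index] [] (by intro e he; simp at he; omega) (by simpa using hfuel),
      runB_eq Z N hV _ [cluster_index] (by intro e he; simp at he; omega)
        (by intro e he; simp at he; subst he; exact hneed)]
  simp
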